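-- pv_equiv track=rewrite | github.com/ev36251/Wingspan-Solver | backend/engine/scoring.py | _nectar_points_for_player
-- ===== SOURCE A (Python) =====
-- def _nectar_points_for_player(
--     sorted_players: list[tuple[str, int]], player_name: str
-- ) -> int:
--     """Calculate nectar points for a specific player given rankings.
--
--     Only 1st place (5pts) and 2nd place (2pts). Ties share the pools for
--     all positions the tied group occupies, rounded down.
--
--     Examples (2 prizes: 5, 2):
--     - 2 tied for 1st: share 5+2=7, each gets floor(7/2) = 3
--     - 3 tied for 1st: share 5+2=7, each gets floor(7/3) = 2
--     - 1st clear, 2 tied for 2nd: 1st gets 5, tied 2nd share 2, each gets 1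
--     """
--     if not sorted_players:
--         return 0
--
--     # Group by nectar count
--     groups: list[list[str]] = []
--     current_count = None
--     for name, count in sorted_players:
--         if count != current_count:
--             groups.append([name])
--             current_count = count
--         else:
--             groups[-1].append(name)
--
--     # Award points: tied groups absorb prizes for all positions they occupy
--     points_pools = [5, 2]
--     position = 0  # current placement position (0-based)
--
--     for group in groups:
--         if position >= len(points_pools):
--             break  # No more prizes to award
--
--         if player_name in group:
--             # Share prizes for positions [position, position + group_size - 1]
--             pool = sum(points_pools[position:position + len(group)])
--             return pool // len(group)
--
--         position += len(group)
--
--     return 0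
-- ===== SOURCE B (Python) =====
-- def _nectar_points_for_player(sorted_players, player_name):
--     names = [name for name, _ in sorted_players]
--     if player_name not in names:
--         return 0
--     i = names.index(player_name)
--     c = sorted_players[i][1]
--     lo = i
--     while lo > 0 and sorted_players[lo - 1][1] == c:
--         lo -= 1
--     if lo >= 2:
--         return 0
--     hi = i
--     while hi + 1 < len(sorted_players) and sorted_players[hi + 1][1] == c:
--         hi += 1
--     size = hi - lo + 1
--     return sum([5, 2][lo:lo + size]) // size
-- ===== Notes on version B (the rewrite author's own statement) =====
-- stated objective: alternative
-- what changed: Instead of building the full list of tie-groups and scanning it with a running position counter, B locates the player's first index directly, expands left/right over consecutive equal counts to delimit the player's own rank-run, and computes the prize share from that run's start index and length; no group list is ever materialised.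
import Mathlib
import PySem

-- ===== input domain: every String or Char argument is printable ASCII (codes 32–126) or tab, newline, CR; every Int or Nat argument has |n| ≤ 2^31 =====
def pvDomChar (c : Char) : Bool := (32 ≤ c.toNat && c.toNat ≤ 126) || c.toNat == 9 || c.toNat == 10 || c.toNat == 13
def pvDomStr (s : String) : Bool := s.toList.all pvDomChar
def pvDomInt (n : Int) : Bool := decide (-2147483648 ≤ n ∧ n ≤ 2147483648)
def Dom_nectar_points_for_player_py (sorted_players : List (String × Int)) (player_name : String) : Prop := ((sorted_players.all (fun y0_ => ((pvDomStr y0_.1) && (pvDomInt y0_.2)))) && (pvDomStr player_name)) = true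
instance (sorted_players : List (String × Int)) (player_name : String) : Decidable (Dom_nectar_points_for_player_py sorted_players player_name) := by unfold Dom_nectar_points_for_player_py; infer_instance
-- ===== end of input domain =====

-- B replaces A's materialised group list + positional scan by a direct index lookup for the
-- player and a left/right expansion of the player's consecutive equal-count run (objective:
-- alternative decomposition, same O(n) cost).

-- ===== PORT A =====
-- the grouping loop: acc holds the groups in reverse order, each group itself in order
def npGroupsAux (xs : List (String × Int)) (acc : List (List String)) (cur : Option Int) : List (List String) :=
  match xs with
  | [] => acc
  | (name, count) :: rest =>
    if cur ≠ some count then npGroupsAux rest ([name] :: acc) (some count)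
    else
      match acc with
      | g :: gs => npGroupsAux rest ((g ++ [name]) :: gs) (some count)
      | [] => []  -- unreachable: cur = some _ only after a first group was pushed

-- the awarding loop over the groups, points_pools = [5, 2]
def npAward (player : String) (groups : List (List String)) (position : Int) : Int :=
  match groups with
  | [] => 0
  | g :: gs =>
    if position ≥ 2 then 0
    else if player ∈ g then
      PySem.Int.floordiv
        (PySem.List.slice ([5, 2] : List Int) (some position) (some (position + g.length))).sum
        (g.length : Int)
    else npAward player gs (position + g.length)

def nectar_points_for_player_py (sorted_players : List (String × Int)) (player_name : String) : Int :=
  match sorted_players with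
  | [] => 0
  | _ :: _ => npAward player_name (npGroupsAux sorted_players [] none).reverse 0

-- ===== PORT B =====
-- while lo > 0 and sorted_players[lo-1][1] == c: lo -= 1
def npExpandLeft (l : List (String × Int)) (c : Int) : Nat → Nat
  | 0 => 0
  | lo + 1 =>
    match l[lo]? with
    | some e => if e.2 = c then npExpandLeft l c lo else lo + 1
    | none => lo + 1  -- unreachable: the starting index is in range

-- while hi + 1 < len(sorted_players) and sorted_players[hi+1][1] == c: hi += 1
def npExpandRight (l : List (String × Int)) (c : Int) (hi : Nat) : Nat :=
  if h : hi + 1 < l.length then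
    if (l[hi + 1]'h).2 = c then npExpandRight l c (hi + 1) else hi
  else hi
termination_by l.length - hi

def nectar_points_for_player_py_alt (sorted_players : List (String × Int)) (player_name : String) : Int :=
  match PySem.List.index? (sorted_players.map Prod.fst) player_name with
  | none => 0  -- player_name not in names
  | some i =>
    match sorted_players[i]? with
    | none => 0  -- unreachable: index? returns an in-range index
    | some e =>
      let lo := npExpandLeft sorted_players e.2 i
      if (lo : Int) ≥ 2 then 0
      else
        let hi := npExpandRight sorted_players e.2 i
        let size : Int := (hi : Int) - (lo : Int) + 1
        PySem.Int.floordiv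
          (PySem.List.slice ([5, 2] : List Int) (some (lo : Int)) (some ((lo : Int) + size))).sum
          size

-- ===== PRECONDITION & SPEC =====
def Spec_nectar_points_for_player_py (sorted_players : List (String × Int)) (player_name : String) (out : Int) : Prop := out = nectar_points_for_player_py_alt sorted_players player_name
instance (sorted_players : List (String × Int)) (player_name : String) (out : Int) : Decidable (Spec_nectar_points_for_player_py sorted_players player_name out) := by unfold Spec_nectar_points_for_player_py; infer_instance

-- ===== CLAIM (what is proved, stated in full; the proofs are below) =====
def Claim_equal_nectar_points_for_player_py : Prop := ∀ (sorted_players : List (String × Int)) (player_name : String), Dom_nectar_points_for_player_py sorted_players player_name → Spec_nectar_points_for_player_py sorted_players player_name (nectar_points_for_player_py sorted_players player_name)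

-- ===== LEMMAS AND PROOFS =====

-- the list of consecutive equal-count runs (name components), proof-side reference
def npRuns : List (String × Int) → List (List String)
  | [] => []
  | (n, c) :: rest =>
    (((n, c) :: rest.takeWhile (fun y => y.2 == c)).map Prod.fst)
      :: npRuns (rest.dropWhile (fun y => y.2 == c))
termination_by l => l.length
decreasing_by
  simp only [List.length_cons]
  exact Nat.lt_succ_of_le (List.length_dropWhile_le _ _)

-- B's computation generalised over a starting position offset, proof-side reference
def npCore (l : List (String × Int)) (p : String) (pos : Int) : Int :=
  match PySem.List.index? (l.map Prod.fst) p with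
  | none => 0
  | some i =>
    match l[i]? with
    | none => 0
    | some e =>
      let lo := npExpandLeft l e.2 i
      if pos + (lo : Int) ≥ 2 then 0
      else
        let hi := npExpandRight l e.2 i
        PySem.Int.floordiv
          (PySem.List.slice ([5, 2] : List Int) (some (pos + (lo : Int)))
            (some (pos + (lo : Int) + ((hi : Int) - (lo : Int) + 1)))).sum
          ((hi : Int) - (lo : Int) + 1)

lemma b_eq_core (l : List (String × Int)) (p : String) :
    nectar_points_for_player_py_alt l p = npCore l p 0 := by
  unfold nectar_points_for_player_py_alt npCore
  cases PySem.List.index? (l.map Prod.fst) p with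
  | none => rfl
  | some i =>
    cases h : l[i]? with
    | none => simp [h]
    | some e => simp [h]

lemma head_dropWhile_ne (l : List (String × Int)) (c : Int) (e : String × Int)
    (h : (l.dropWhile (fun y => y.2 == c)).head? = some e) : e.2 ≠ c := by
  have := List.head?_dropWhile_not (fun y : String × Int => y.2 == c) l
  rw [h] at this
  simpa using this


lemma groupsAux_run (rest : List (String × Int)) (g : List String) (gs : List (List String)) (c : Int) :
    npGroupsAux rest (g :: gs) (some c) =
      npGroupsAux (rest.dropWhile (fun y => y.2 == c))
        ((g ++ (rest.takeWhile (fun y => y.2 == c)).map Prod.fst) :: gs) (some c) := by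
  induction rest generalizing g with
  | nil => simp [npGroupsAux]
  | cons x r ih =>
    obtain ⟨n, c'⟩ := x
    by_cases hc : c' = c
    · subst hc
      simp only [npGroupsAux, ne_eq, not_true_eq_false, if_false, List.takeWhile_cons,
        beq_self_eq_true, List.dropWhile_cons, if_true, List.map_cons]
      rw [ih (g ++ [n])]
      simp [List.append_assoc]
    · have ht : (((n, c') :: r).takeWhile (fun y => y.2 == c)) = [] := by
        simp [hc]
      have hd : (((n, c') :: r).dropWhile (fun y => y.2 == c)) = (n, c') :: r := by
        simp [hc]
      rw [ht, hd]; simp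

lemma groupsAux_new (N : Nat) (l : List (String × Int)) (gs : List (List String)) (c : Int)
    (hN : l.length ≤ N) (h : ∀ e, l.head? = some e → e.2 ≠ c) :
    npGroupsAux l gs (some c) = (npRuns l).reverse ++ gs := by
  induction N generalizing l gs c with
  | zero =>
    have : l = [] := List.length_eq_zero_iff.mp (Nat.le_zero.mp hN)
    subst this
    simp [npGroupsAux, npRuns]
  | succ N ih =>
    cases l with
    | nil => simp [npGroupsAux, npRuns]
    | cons x r =>
      obtain ⟨n, c'⟩ := x
      have hc : c' ≠ c := by
        have := h (n, c') rfl; simpa using this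
      have step : npGroupsAux ((n, c') :: r) gs (some c) = npGroupsAux r ([n] :: gs) (some c') := by
        rw [npGroupsAux.eq_def]
        simp only []
        rw [if_pos (by simp [Ne]; exact fun hh => hc hh.symm)]
      rw [step, groupsAux_run]
      rw [ih _ _ _ (le_trans (List.length_dropWhile_le _ _) (Nat.succ_le_succ_iff.mp hN))
        (fun e he => head_dropWhile_ne r c' e he)]
      rw [npRuns]
      simp [List.append_assoc]


lemma groups_eq_runs (l : List (String × Int)) :
    (npGroupsAux l [] none).reverse = npRuns l := by
  cases l with
  | nil => simp [npGroupsAux, npRuns]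
  | cons x r =>
    obtain ⟨n, c⟩ := x
    have step : npGroupsAux ((n, c) :: r) [] none = npGroupsAux r [[n]] (some c) := by
      rw [npGroupsAux.eq_def]
      simp only []
      rw [if_pos (by simp)]
    rw [step, groupsAux_run]
    rw [groupsAux_new (r.dropWhile (fun y => y.2 == c)).length _ _ _ le_rfl
      (fun e he => head_dropWhile_ne r c e he)]
    rw [npRuns]
    simp

lemma expandLeft_zero (l : List (String × Int)) (c : Int) (i : Nat)
    (h : ∀ j, j < i → ∃ e, l[j]? = some e ∧ e.2 = c) :
    npExpandLeft l c i = 0 := by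
  induction i with
  | zero => rfl
  | succ i ih =>
    obtain ⟨e, he, he2⟩ := h i (Nat.lt_succ_self i)
    rw [npExpandLeft, he]
    simp only [he2, if_pos]
    exact ih (fun j hj => h j (Nat.lt_succ_of_lt hj))


lemma expandRight_to (l : List (String × Int)) (c : Int) (m : Nat) :
    ∀ i, i < m →
    (∀ j, j < m → ∃ e, l[j]? = some e ∧ e.2 = c) →
    (∀ e, l[m]? = some e → e.2 ≠ c) →
    npExpandRight l c i = m - 1 := by
  have H : ∀ d i, m - 1 - i ≤ d → i < m →
      (∀ j, j < m → ∃ e, l[j]? = some e ∧ e.2 = c) →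
      (∀ e, l[m]? = some e → e.2 ≠ c) →
      npExpandRight l c i = m - 1 := by
    intro d
    induction d with
    | zero =>
      intro i hd him hall hstop
      have hi : i = m - 1 := by omega
      subst hi
      rw [npExpandRight]
      by_cases hlen : m - 1 + 1 < l.length
      · have hm : m - 1 + 1 = m := by omega
        rw [dif_pos hlen]
        have hget : l[m - 1 + 1]? = some (l[m - 1 + 1]'hlen) := List.getElem?_eq_getElem hlen
        rw [if_neg]
        intro hc
        exact hstop _ (by rw [← hm]; exact hget) (by simpa using hc)
      · rw [dif_neg hlen]
    | succ d ihd =>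
      intro i hd him hall hstop
      by_cases hi : i = m - 1
      · exact ihd i (by omega) him hall hstop
      · have him' : i + 1 < m := by omega
        obtain ⟨e, he, he2⟩ := hall (i + 1) him'
        have hlen : i + 1 < l.length := (List.getElem?_eq_some_iff.mp he).1
        rw [npExpandRight, dif_pos hlen, if_pos]
        · have : npExpandRight l c (i + 1) = m - 1 := ihd (i + 1) (by omega) him' hall hstop
          exact this
        · have : l[i + 1]'hlen = e := by
            have := List.getElem?_eq_getElem hlen
            rw [he] at this
            exact (Option.some_inj.mp this).symm
          rw [this, he2]
  intro i him hall hstop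
  exact H (m - 1 - i) i le_rfl him hall hstop


lemma expandLeft_append (a b : List (String × Int)) (ca c : Int) (j : Nat)
    (ha0 : a ≠ []) (ha : ∀ x ∈ a, x.2 = ca)
    (hb : ∀ e, b.head? = some e → e.2 ≠ ca)
    (hj : ∃ e, b[j]? = some e ∧ e.2 = c) :
    npExpandLeft (a ++ b) c (a.length + j) = a.length + npExpandLeft b c j := by
  induction j with
  | zero =>
    obtain ⟨e, he, he2⟩ := hj
    have hhead : b.head? = some e := by rw [List.head?_eq_getElem?]; exact he
    have hcca : c ≠ ca := fun hh => hb e hhead (by rw [he2, hh])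
    have hk : 0 < a.length := List.length_pos_iff.mpr ha0
    have hlt : a.length - 1 < a.length := by omega
    have hget : (a ++ b)[a.length - 1]? = some (a[a.length - 1]'hlt) := by
      rw [List.getElem?_append_left hlt]
      exact List.getElem?_eq_getElem hlt
    have hsnd : (a[a.length - 1]'hlt).2 = ca := ha _ (List.getElem_mem hlt)
    have hstep : npExpandLeft (a ++ b) c ((a.length - 1) + 1) = (a.length - 1) + 1 := by
      rw [npExpandLeft, hget]
      simp only [hsnd]
      rw [if_neg (fun hh => hcca hh.symm)]
    rw [(by omega : a.length + 0 = (a.length - 1) + 1), hstep]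
    simp [npExpandLeft]
    omega
  | succ j ih =>
    obtain ⟨e, he, he2⟩ := hj
    have hjlen : j + 1 < b.length := (List.getElem?_eq_some_iff.mp he).1
    have hjb : j < b.length := by omega
    have hgetb : b[j]? = some (b[j]'hjb) := List.getElem?_eq_getElem hjb
    have hgetab : (a ++ b)[a.length + j]? = b[j]? := by
      rw [List.getElem?_append_right (by omega)]
      congr 1
      omega
    rw [(by omega : a.length + (j + 1) = (a.length + j) + 1)]
    simp only [npExpandLeft, hgetab, hgetb]
    by_cases hc : (b[j]'hjb).2 = c
    · simp only [hc]
      exact ih ⟨b[j]'hjb, hgetb, hc⟩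
    · simp only [if_neg hc]
      omega


lemma expandRight_append (a b : List (String × Int)) (c : Int) (j : Nat) :
    npExpandRight (a ++ b) c (a.length + j) = a.length + npExpandRight b c j := by
  have H : ∀ d j, b.length - j ≤ d →
      npExpandRight (a ++ b) c (a.length + j) = a.length + npExpandRight b c j := by
    intro d
    induction d with
    | zero =>
      intro j hd
      have hb' : npExpandRight b c j = j := by
        rw [npExpandRight, dif_neg (by omega)]
      rw [hb', npExpandRight, dif_neg (by simp only [List.length_append]; omega)]
    | succ d ihd =>
      intro j hd
      by_cases hlen : j + 1 < b.length
      · have hlen' : a.length + j + 1 < (a ++ b).length := by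
          simp only [List.length_append]; omega
        have hget : (a ++ b)[a.length + j + 1]'hlen' = b[j + 1]'hlen := by
          rw [List.getElem_append_right (by omega)]
          congr 1
          omega
        have L : npExpandRight (a ++ b) c (a.length + j) =
            if (b[j + 1]'hlen).2 = c then npExpandRight (a ++ b) c (a.length + (j + 1)) else a.length + j := by
          conv_lhs => rw [npExpandRight]
          rw [dif_pos hlen', hget, ← Nat.add_assoc]
        have R : npExpandRight b c j =
            if (b[j + 1]'hlen).2 = c then npExpandRight b c (j + 1) else j := by
          conv_lhs => rw [npExpandRight]
          rw [dif_pos hlen]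
        rw [L, R]
        by_cases hc : (b[j + 1]'hlen).2 = c
        · rw [if_pos hc, if_pos hc]
          exact ihd (j + 1) (by omega)
        · rw [if_neg hc, if_neg hc]
      · have hb' : npExpandRight b c j = j := by
          rw [npExpandRight, dif_neg hlen]
        rw [hb', npExpandRight, dif_neg (by simp only [List.length_append]; omega)]
  exact H (b.length - j) j le_rfl


lemma index?_append_shift (l₁ l₂ : List String) (a : String) (h : a ∉ l₁) :
    PySem.List.index? (l₁ ++ l₂) a = (PySem.List.index? l₂ a).map (l₁.length + ·) := by
  induction l₁ with
  | nil =>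
    simp only [List.nil_append, List.length_nil]
    cases PySem.List.index? l₂ a <;> simp
  | cons x xs ih =>
    simp only [List.mem_cons, not_or] at h
    rw [List.cons_append, PySem.List.index?_cons_of_ne (xs ++ l₂) (fun hh => h.1 hh.symm), ih h.2]
    cases PySem.List.index? l₂ a <;> simp <;> omega

lemma award_cons (p : String) (g : List String) (gs : List (List String)) (pos : Int) :
    npAward p (g :: gs) pos =
      if pos ≥ 2 then 0
      else if p ∈ g then
        PySem.Int.floordiv
          (PySem.List.slice ([5, 2] : List Int) (some pos) (some (pos + g.length))).sum
          (g.length : Int)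
      else npAward p gs (pos + g.length) := rfl

lemma award_runs_eq_core (N : Nat) (l : List (String × Int)) (p : String) (pos : Int)
    (hN : l.length ≤ N) (hpos : 0 ≤ pos) :
    npAward p (npRuns l) pos = npCore l p pos := by
  induction N generalizing l pos with
  | zero =>
    have : l = [] := List.length_eq_zero_iff.mp (Nat.le_zero.mp hN)
    subst this
    simp [npRuns, npAward, npCore, PySem.List.index?_eq_idxOf?]
  | succ N ih =>
    cases l with
    | nil => simp [npRuns, npAward, npCore, PySem.List.index?_eq_idxOf?]
    | cons x rest =>
      obtain ⟨n, ca⟩ := x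
      set t := rest.takeWhile (fun y => y.2 == ca) with ht
      set d := rest.dropWhile (fun y => y.2 == ca) with hd
      set a : List (String × Int) := (n, ca) :: t with hA
      have hsplit : (n, ca) :: rest = a ++ d := by
        simp [hA, ht, hd]
      have ha : ∀ x ∈ a, x.2 = ca := by
        intro x hx
        rcases List.mem_cons.mp hx with h1 | h2
        · rw [h1]
        · simpa using List.mem_takeWhile_imp h2
      have hb : ∀ e, d.head? = some e → e.2 ≠ ca := fun e he => head_dropWhile_ne rest ca e he
      have hruns : npRuns ((n, ca) :: rest) = (a.map Prod.fst) :: npRuns d := by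
        rw [npRuns]
      set k := a.length with hk
      have hk1 : 1 ≤ k := by simp [hk, hA]
      have hdlen : d.length ≤ N := by
        have h1 : rest.length ≤ N := by simpa using hN
        exact le_trans (List.length_dropWhile_le _ _) h1
      have hmap : ((n, ca) :: rest).map Prod.fst = a.map Prod.fst ++ d.map Prod.fst := by
        rw [hsplit, List.map_append]
      by_cases hp : p ∈ a.map Prod.fst
      · -- the player is in the first run
        have hidx0 : PySem.List.index? (((n, ca) :: rest).map Prod.fst) p
            = PySem.List.index? (a.map Prod.fst) p := by
          rw [hmap, PySem.List.index?_append_of_mem _ hp]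
        have hsome : (PySem.List.index? (a.map Prod.fst) p).isSome := by
          rw [PySem.List.index?_isSome_iff]
          exact hp
        obtain ⟨i, hi⟩ := Option.isSome_iff_exists.mp hsome
        have hik : i < k := by
          obtain ⟨hlt, -, -⟩ := PySem.List.getElem_of_index?_eq_some hi
          simpa [hk] using hlt
        have hia : i < a.length := by simpa [hk] using hik
        have hgetl : ((n, ca) :: rest)[i]? = some (a[i]'hia) := by
          rw [hsplit, List.getElem?_append_left hia]
          exact List.getElem?_eq_getElem hia
        have hca : (a[i]'hia).2 = ca := ha _ (List.getElem_mem hia)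
        have hallk : ∀ j, j < k → ∃ e, ((n, ca) :: rest)[j]? = some e ∧ e.2 = ca := by
          intro j hj
          have hja : j < a.length := by simpa [hk] using hj
          refine ⟨a[j]'hja, ?_, ha _ (List.getElem_mem hja)⟩
          rw [hsplit, List.getElem?_append_left hja]
          exact List.getElem?_eq_getElem hja
        have hstop : ∀ e, ((n, ca) :: rest)[k]? = some e → e.2 ≠ ca := by
          intro e he
          apply hb e
          rw [List.head?_eq_getElem?]
          rw [hsplit, List.getElem?_append_right (by omega : a.length ≤ k)] at he
          simp only [hk, Nat.sub_self] at he
          exact he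
        have hlo : npExpandLeft ((n, ca) :: rest) ca i = 0 :=
          expandLeft_zero _ _ _ (fun j hj => hallk j (lt_trans hj hik))
        have hhi : npExpandRight ((n, ca) :: rest) ca i = k - 1 :=
          expandRight_to _ _ k i hik hallk hstop
        have hkcast : (((k - 1 : Nat)) : Int) + 1 = (k : Int) := by omega
        have hcore : npCore ((n, ca) :: rest) p pos =
            if pos ≥ 2 then 0
            else PySem.Int.floordiv
              (PySem.List.slice ([5, 2] : List Int) (some pos) (some (pos + (k : Int)))).sum
              (k : Int) := by
          unfold npCore
          rw [hidx0, hi]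
          simp only [hgetl, hca, hlo, hhi, Nat.cast_zero, add_zero, sub_zero, ge_iff_le,
            hkcast]
        rw [hruns, award_cons, hcore, if_pos hp]
        simp [hk]
      · -- the player is not in the first run
        have hanil : a ≠ [] := by simp [hA]
        have hidx : PySem.List.index? (((n, ca) :: rest).map Prod.fst) p
            = (PySem.List.index? (d.map Prod.fst) p).map (k + ·) := by
          rw [hmap, index?_append_shift _ _ _ hp]
          simp [hk]
        have haward : npAward p (npRuns ((n, ca) :: rest)) pos =
            if pos ≥ 2 then 0 else npCore d p (pos + (k : Int)) := by
          rw [hruns, award_cons, if_neg hp]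
          by_cases hpos2 : pos ≥ 2
          · rw [if_pos hpos2, if_pos hpos2]
          · rw [if_neg hpos2, if_neg hpos2]
            have : (a.map Prod.fst).length = k := by simp [hk]
            rw [this]
            exact ih d (pos + k) hdlen (by omega)
        cases hdi : PySem.List.index? (d.map Prod.fst) p with
        | none =>
          have hcoreL : npCore ((n, ca) :: rest) p pos = 0 := by
            unfold npCore
            rw [hidx, hdi]
            rfl
          have hcoreD : npCore d p (pos + (k : Int)) = 0 := by
            unfold npCore
            rw [hdi]
          rw [haward, hcoreL, hcoreD]
          split_ifs <;> rfl
        | some j =>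
          have hjd : j < d.length := by
            obtain ⟨hlt, -, -⟩ := PySem.List.getElem_of_index?_eq_some hdi
            simpa using hlt
          have hgetd : d[j]? = some (d[j]'hjd) := List.getElem?_eq_getElem hjd
          have hgetl : ((n, ca) :: rest)[k + j]? = some (d[j]'hjd) := by
            rw [hsplit, List.getElem?_append_right (by omega : a.length ≤ k + j)]
            simpa [hk] using hgetd
          have hL : npExpandLeft ((n, ca) :: rest) (d[j]'hjd).2 (k + j)
              = k + npExpandLeft d (d[j]'hjd).2 j := by
            rw [hsplit]
            exact expandLeft_append a d ca _ j hanil ha hb ⟨d[j]'hjd, hgetd, rfl⟩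
          have hR : npExpandRight ((n, ca) :: rest) (d[j]'hjd).2 (k + j)
              = k + npExpandRight d (d[j]'hjd).2 j := by
            rw [hsplit]
            exact expandRight_append a d _ j
          have hcoreL : npCore ((n, ca) :: rest) p pos = npCore d p (pos + (k : Int)) := by
            unfold npCore
            rw [hidx, hdi]
            simp only [Option.map_some, hgetl, hgetd, hL, hR]
            push_cast
            ring_nf
          rw [haward, hcoreL]
          by_cases hpos2 : pos ≥ 2
          · rw [if_pos hpos2]
            unfold npCore
            simp only [hdi, hgetd]
            rw [if_pos (by omega)]
          · rw [if_neg hpos2]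

lemma a_eq_award (l : List (String × Int)) (p : String) :
    nectar_points_for_player_py l p = npAward p (npRuns l) 0 := by
  cases l with
  | nil => simp [nectar_points_for_player_py, npRuns, npAward]
  | cons x r =>
    show npAward p (npGroupsAux (x :: r) [] none).reverse 0 = _
    rw [groups_eq_runs]

-- ===== VERDICT (by name: the statement is the Claim_ definition above) =====
theorem nectar_points_for_player_py_spec : Claim_equal_nectar_points_for_player_py := by
  intro l p _
  unfold Spec_nectar_points_for_player_py
  rw [a_eq_award, award_runs_eq_core l.length l p 0 le_rfl le_rfl, b_eq_core]
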